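-- pv_equiv track=rewrite | github.com/StrayDogSyn/weather_dashboard_E_Hunter_Petross | src/models/capstone/activities.py | _parse_ai_variations
-- ===== SOURCE A (Python) =====
-- from typing import Any, Dict, List, Optional, Tuple
--
-- def _parse_ai_variations(ai_text: str) -> List[Dict[str, Any]]:
--     """Parse AI response into structured variations."""
--     # Simple parsing - in production, this would be more sophisticated
--     variations = []
--     lines = ai_text.split("\n")
--
--     current_variation = {}
--     for line in lines:
--         line = line.strip()
--         if line and not line.startswith("#"):
--             if any(
--                 word in line.lower()
--                 for word in ["variation", "alternative", "option"]
--             ):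
--                 if current_variation:
--                     variations.append(current_variation)
--                 current_variation = {"description": line}
--             elif current_variation:
--                 current_variation["details"] = (
--                     current_variation.get("details", "") + " " + line
--                 )
--
--     if current_variation:
--         variations.append(current_variation)
--
--     return variations[:5]  # Limit to 5 variations
-- ===== SOURCE B (Python) =====
-- def _parse_ai_variations(ai_text):
--     """Parse AI response into structured variations.
--
--     Rewrite: clean the lines first, then build the variation list
--     back-to-front in one reversed pass (lines accumulate in tail_rev
--     until their header line is reached), instead of A's forward pass
--     with a mutable current dict.
--     """
--     cleaned = [s for s in (l.strip() for l in ai_text.split("\n"))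
--                if s and not s.startswith("#")]
--
--     def is_header(s):
--         low = s.lower()
--         return "variation" in low or "alternative" in low or "option" in low
--
--     out_rev = []
--     tail_rev = []
--     for s in reversed(cleaned):
--         if is_header(s):
--             d = {"description": s}
--             if tail_rev:
--                 d["details"] = " " + " ".join(reversed(tail_rev))
--             out_rev.append(d)
--             tail_rev = []
--         else:
--             tail_rev.append(s)
--     return list(reversed(out_rev))[:5]
-- ===== Notes on version B (the rewrite author's own statement) =====
-- stated objective: alternative
-- what changed: B first builds the cleaned line list, then constructs the variation list back-to-front in one reversed pass that accumulates detail lines until their header is reached and emits each group's dict via a single join, instead of A's forward pass mutating a current dict with repeated details-concatenation.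
import Mathlib
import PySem

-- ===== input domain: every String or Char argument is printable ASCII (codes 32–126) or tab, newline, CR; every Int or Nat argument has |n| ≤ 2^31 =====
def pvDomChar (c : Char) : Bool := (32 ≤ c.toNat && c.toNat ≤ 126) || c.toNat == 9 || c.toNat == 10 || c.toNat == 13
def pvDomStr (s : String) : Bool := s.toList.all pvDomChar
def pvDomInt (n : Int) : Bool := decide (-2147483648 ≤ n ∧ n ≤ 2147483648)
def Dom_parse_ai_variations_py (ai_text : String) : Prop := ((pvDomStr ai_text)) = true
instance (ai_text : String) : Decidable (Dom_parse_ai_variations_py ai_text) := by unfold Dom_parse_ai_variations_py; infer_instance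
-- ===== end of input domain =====

-- B cleans the lines first and then builds the variation list back-to-front in one
-- reversed pass, instead of A's forward pass mutating a current dict (objective: alternative).
-- Strings are handled on the List Char side via PySem.Chars (exact); dicts are PySem.Dict,
-- emitted as their .items association lists.

-- ===== PORT A =====
-- 'line and not line.startswith("#")'  (shared, textually identical, filter test of both Pythons)
def pvKeep (line : List Char) : Bool := !line.isEmpty && !PySem.Chars.startswith line "#".toList

-- 'if current_variation: variations.append(current_variation)' + return of variations
def pvFlush (st : List (List (String × String)) × PySem.Dict String String) :
    List (List (String × String)) :=
  if !st.2.items.isEmpty then st.1 ++ [st.2.items] else st.1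

-- A's loop body after the strip-and-filter guard
def pvACore (st : List (List (String × String)) × PySem.Dict String String)
    (line : List Char) : List (List (String × String)) × PySem.Dict String String :=
  if ["variation".toList, "alternative".toList, "option".toList].any
      (fun w => PySem.Chars.isIn w (PySem.Chars.lower line)) then
    ((if !st.2.items.isEmpty then st.1 ++ [st.2.items] else st.1),
     PySem.Dict.mk [("description", String.ofList line)])
  else if !st.2.items.isEmpty then
    (st.1, PySem.Dict.insert st.2 "details"
      (String.ofList ((PySem.Dict.getD st.2 "details" "").toList ++ ' ' :: line)))
  else st

def pvAStep (st : List (List (String × String)) × PySem.Dict String String)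
    (line0 : List Char) : List (List (String × String)) × PySem.Dict String String :=
  let line := PySem.Chars.strip line0
  if pvKeep line then pvACore st line else st

def parse_ai_variations_py (ai_text : String) : List (List (String × String)) :=
  PySem.List.slice
    (pvFlush ((PySem.Chars.splitOn ai_text.toList "\n".toList).foldl pvAStep
      ([], PySem.Dict.mk []))) none (some 5)

-- ===== PORT B =====
def pvIsHeader (s : List Char) : Bool :=
  let low := PySem.Chars.lower s
  PySem.Chars.isIn "variation".toList low || PySem.Chars.isIn "alternative".toList low ||
    PySem.Chars.isIn "option".toList low

def pvBStep (st : List (List (String × String)) × List (List Char))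
    (s : List Char) : List (List (String × String)) × List (List Char) :=
  if pvIsHeader s then
    let d := PySem.Dict.mk [("description", String.ofList s)]
    let d := if !st.2.isEmpty then
        PySem.Dict.insert d "details"
          (String.ofList (' ' :: PySem.Chars.join [' '] st.2.reverse))
      else d
    (st.1 ++ [d.items], [])
  else (st.1, st.2 ++ [s])

def parse_ai_variations_py_alt (ai_text : String) : List (List (String × String)) :=
  PySem.List.slice
    (((((PySem.Chars.splitOn ai_text.toList "\n".toList).map
        PySem.Chars.strip).filter pvKeep).reverse.foldl pvBStep ([], [])).1.reverse)
    none (some 5)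

-- ===== PRECONDITION & SPEC =====
def Spec_parse_ai_variations_py (ai_text : String) (out : List (List (String × String))) : Prop := out = parse_ai_variations_py_alt ai_text
instance (ai_text : String) (out : List (List (String × String))) : Decidable (Spec_parse_ai_variations_py ai_text out) := by unfold Spec_parse_ai_variations_py; infer_instance

-- ===== CLAIM (what is proved, stated in full; the proofs are below) =====
def Claim_equal_parse_ai_variations_py : Prop := ∀ (ai_text : String), Dom_parse_ai_variations_py ai_text → Spec_parse_ai_variations_py ai_text (parse_ai_variations_py ai_text)

-- ===== LEMMAS AND PROOFS =====

-- 'not a header line' (the takeWhile/dropWhile predicate of the segmentation spec)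
def pvNH (s : List Char) : Bool := !pvIsHeader s

-- segmentation spec: the groups (header, following detail lines) of a cleaned line list
def pvG : List (List Char) → List (List Char × List (List Char))
  | [] => []
  | c :: cs =>
    if pvIsHeader c then (c, cs.takeWhile pvNH) :: pvG (cs.dropWhile pvNH)
    else pvG cs
termination_by l => l.length
decreasing_by
  · have := List.length_dropWhile_le pvNH cs; simp; omega
  · simp

-- the dict B builds for one group, as an items list
def pvMkB (c : List Char) (tail : List (List Char)) : List (String × String) :=
  if tail.isEmpty then [("description", String.ofList c)]
  else [("description", String.ofList c),
        ("details", String.ofList (' ' :: PySem.Chars.join [' '] tail))]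

-- A's repeated details-concatenation over a list of detail lines
def pvAddDet (cur : PySem.Dict String String) (tail : List (List Char)) : PySem.Dict String String :=
  tail.foldl (fun c l => PySem.Dict.insert c "details"
    (String.ofList ((PySem.Dict.getD c "details" "").toList ++ ' ' :: l))) cur

lemma pvHeader_eq (l : List Char) :
    (["variation".toList, "alternative".toList, "option".toList].any
      (fun w => PySem.Chars.isIn w (PySem.Chars.lower l))) = pvIsHeader l := by
  simp [pvIsHeader, Bool.or_assoc]

lemma pvG_dropWhile (l : List (List Char)) : pvG (l.dropWhile pvNH) = pvG l := by
  induction l with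
  | nil => rfl
  | cons c cs ih =>
    by_cases h : pvIsHeader c
    · simp [pvNH, h]
    · simp [pvNH, h, ih, pvG]

lemma pvJoin_cons (l : List Char) (t : List (List Char)) :
    ' ' :: PySem.Chars.join [' '] (l :: t) = (' ' :: l) ++ t.flatMap (fun x => ' ' :: x) := by
  induction t generalizing l with
  | nil => simp [PySem.Chars.join_singleton]
  | cons q r ih =>
    rw [PySem.Chars.join_cons_cons]
    simp only [List.flatMap_cons] at *
    simp [← ih q]

lemma pvAddDet_details (t : List (List Char)) (x : String) (s : List Char) :
    pvAddDet (PySem.Dict.mk [("description", x), ("details", String.ofList s)]) t =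
      PySem.Dict.mk [("description", x),
        ("details", String.ofList (s ++ t.flatMap (fun l => ' ' :: l)))] := by
  induction t generalizing s with
  | nil => simp [pvAddDet]
  | cons l t' ih =>
    have h1 : pvAddDet (PySem.Dict.mk [("description", x), ("details", String.ofList s)]) (l :: t')
        = pvAddDet (PySem.Dict.mk [("description", x),
            ("details", String.ofList (s ++ ' ' :: l))]) t' := by
      simp [pvAddDet, PySem.Dict.insert, PySem.Dict.getD, PySem.Dict.get?, PySem.Dict.contains]
    rw [h1, ih]
    simp

lemma pvAddDet_mk (c : List Char) (t : List (List Char)) :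
    (pvAddDet (PySem.Dict.mk [("description", String.ofList c)]) t).items = pvMkB c t := by
  cases t with
  | nil => simp [pvAddDet, pvMkB]
  | cons l t' =>
    have h1 : pvAddDet (PySem.Dict.mk [("description", String.ofList c)]) (l :: t')
        = pvAddDet (PySem.Dict.mk [("description", String.ofList c),
            ("details", String.ofList (' ' :: l))]) t' := by
      simp [pvAddDet, PySem.Dict.insert, PySem.Dict.getD, PySem.Dict.get?, PySem.Dict.contains]
    rw [h1, pvAddDet_details]
    simp [pvMkB, pvJoin_cons]

lemma pvInsert_items_ne (d : PySem.Dict String String) (k : String) (v : String)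
    (h : d.items ≠ []) : (PySem.Dict.insert d k v).items ≠ [] := by
  simp [PySem.Dict.insert]
  split <;> simp [h]

lemma pvA_ne (cs : List (List Char)) (vars : List (List (String × String)))
    (cur : PySem.Dict String String) (h : cur.items ≠ []) :
    pvFlush (cs.foldl pvACore (vars, cur)) =
      vars ++ [(pvAddDet cur (cs.takeWhile pvNH)).items] ++
        (pvG (cs.dropWhile pvNH)).map (fun g => pvMkB g.1 g.2) := by
  induction cs generalizing vars cur with
  | nil => simp [pvFlush, pvAddDet, pvG, h]
  | cons c cs ih =>
    by_cases hc : pvIsHeader c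
    · have hstep : pvACore (vars, cur) c =
          (vars ++ [cur.items], PySem.Dict.mk [("description", String.ofList c)]) := by
        unfold pvACore; rw [pvHeader_eq]; simp [hc, h]
      rw [List.foldl_cons, hstep, ih _ _ (by simp), pvAddDet_mk]
      simp [pvNH, hc, pvAddDet, pvG]
    · have hstep : pvACore (vars, cur) c =
          (vars, PySem.Dict.insert cur "details"
            (String.ofList ((PySem.Dict.getD cur "details" "").toList ++ ' ' :: c))) := by
        unfold pvACore; rw [pvHeader_eq]; simp [hc, h]
      rw [List.foldl_cons, hstep, ih _ _ (pvInsert_items_ne _ _ _ h)]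
      simp [pvNH, hc, pvAddDet]

lemma pvA_empty (cs : List (List Char)) (vars : List (List (String × String))) :
    pvFlush (cs.foldl pvACore (vars, PySem.Dict.mk [])) =
      vars ++ (pvG cs).map (fun g => pvMkB g.1 g.2) := by
  induction cs generalizing vars with
  | nil => simp [pvFlush, pvG]
  | cons c cs ih =>
    by_cases hc : pvIsHeader c
    · have hstep : pvACore (vars, PySem.Dict.mk ([] : List (String × String))) c =
          (vars, PySem.Dict.mk [("description", String.ofList c)]) := by
        unfold pvACore; rw [pvHeader_eq]; simp [hc]
      rw [List.foldl_cons, hstep, pvA_ne _ _ _ (by simp)]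
      simp [pvG, hc, pvAddDet_mk, pvG_dropWhile]
    · have hstep : pvACore (vars, PySem.Dict.mk ([] : List (String × String))) c =
          (vars, PySem.Dict.mk []) := by
        unfold pvACore; rw [pvHeader_eq]; simp [hc]
      rw [List.foldl_cons, hstep, ih]
      simp [pvG, hc]

lemma pvB_foldr (cs : List (List Char)) :
    cs.foldr (fun s st => pvBStep st s) ([], []) =
      (((pvG cs).map (fun g => pvMkB g.1 g.2)).reverse, (cs.takeWhile pvNH).reverse) := by
  induction cs with
  | nil => simp [pvG]
  | cons c cs ih =>
    rw [List.foldr_cons, ih]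
    by_cases hc : pvIsHeader c
    · have hd : pvBStep (((pvG cs).map (fun g => pvMkB g.1 g.2)).reverse,
          (cs.takeWhile pvNH).reverse) c =
          (((pvG cs).map (fun g => pvMkB g.1 g.2)).reverse ++
            [pvMkB c (cs.takeWhile pvNH)], []) := by
        cases ht : cs.takeWhile pvNH with
        | nil => simp [pvBStep, hc, pvMkB]
        | cons l t' =>
          simp [pvBStep, hc, pvMkB, PySem.Dict.insert, PySem.Dict.contains]
      rw [hd]
      simp [pvG, hc, pvNH, ← pvG_dropWhile cs]
    · simp [pvBStep, hc, pvG, pvNH]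

lemma pvStage1 (ls : List (List Char)) (init : List (List (String × String)) × PySem.Dict String String) :
    ls.foldl pvAStep init = ((ls.map PySem.Chars.strip).filter pvKeep).foldl pvACore init := by
  rw [List.foldl_filter, List.foldl_map]
  rfl

-- ===== VERDICT (by name: the statement is the Claim_ definition above) =====
theorem parse_ai_variations_py_spec : Claim_equal_parse_ai_variations_py := by
  intro ai_text _
  unfold Spec_parse_ai_variations_py parse_ai_variations_py parse_ai_variations_py_alt
  rw [pvStage1, List.foldl_reverse, pvB_foldr, List.reverse_reverse,
    pvA_empty (((PySem.Chars.splitOn ai_text.toList "\n".toList).map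
      PySem.Chars.strip).filter pvKeep) []]
  simp
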